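-- pv_equiv track=rewrite | github.com/SeongwonChung/CodingTest | dongbinbook/Implement/기출/09-문자열압축.py | solution
-- ===== SOURCE A (Python) =====
-- def solution(s):
--     length = len(s)
--     answer = length
--     for w in range(1, length // 2 + 1):
--         compressed = ""
--         count = 1
--         _cur = s[0:w]
--         for j in range(w, length, w):
--             if _cur == s[j : j + w]:
--                 count += 1
--             else:
--                 compressed += str(count) + _cur if count >= 2 else _cur
--                 _cur = s[j : j + w]
--                 count = 1
--         compressed += str(count) + _cur if count >= 2 else _cur
--         answer = min(answer, len(compressed))
--
--     return answer
-- ===== SOURCE B (Python) =====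
-- def solution(s):
--     n = len(s)
--     best = n
--     for w in range(1, n // 2 + 1):
--         # Stage 1: run-start boundaries, found by comparing each width-w window
--         # with the window immediately before it (no run-length state is kept).
--         starts = [j for j in range(0, n, w) if j == 0 or s[j - w:j] != s[j:j + w]]
--         # Stage 2: each run is the span between consecutive boundaries; its
--         # compressed length follows arithmetically from the span width.
--         total = sum(
--             w + len(str(-(-(b - a) // w))) if b - a > w else b - a
--             for a, b in zip(starts, starts[1:] + [n])
--         )
--         best = min(best, total)
--     return best
-- ===== Notes on version B (the rewrite author's own statement) =====
-- stated objective: alternative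
-- what changed: B keeps no run-length state at all: per width it first computes the set of run-start boundaries by comparing each width-w window with the window immediately before it, then derives each run's compressed length arithmetically from the gap between consecutive boundaries (count = ceil(gap/w)), whereas A sequentially builds the compressed string with a running counter compared against the run's head chunk.
import Mathlib
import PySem

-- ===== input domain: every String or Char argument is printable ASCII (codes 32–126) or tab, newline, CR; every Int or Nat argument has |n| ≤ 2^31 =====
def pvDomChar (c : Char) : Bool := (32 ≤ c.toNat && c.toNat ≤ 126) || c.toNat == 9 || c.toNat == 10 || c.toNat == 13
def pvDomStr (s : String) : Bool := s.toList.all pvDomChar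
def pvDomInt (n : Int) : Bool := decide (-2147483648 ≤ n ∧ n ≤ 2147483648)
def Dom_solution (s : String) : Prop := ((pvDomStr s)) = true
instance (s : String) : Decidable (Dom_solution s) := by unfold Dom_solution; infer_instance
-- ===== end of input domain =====

-- B keeps no run-length state: per width it computes the run-start boundaries by comparing each
-- width-w window with the one before it, then derives each run's compressed length arithmetically
-- from the gap between consecutive boundaries (objective: alternative algorithmic decomposition).

-- ===== PORT A =====
-- compressed += (str(count) + _cur) if count >= 2 else _cur
def aEmit (count : Int) (cur : List Char) : List Char :=
  if count ≥ 2 then PySem.Int.toChars count ++ cur else cur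

-- one iteration of A's inner loop; state = (compressed, count, _cur)
def aStep (cs : List Char) (w : Int) (st : List Char × Int × List Char) (j : Int) :
    List Char × Int × List Char :=
  if st.2.2 = PySem.List.slice cs (some j) (some (j + w)) then
    (st.1, st.2.1 + 1, st.2.2)
  else
    (st.1 ++ aEmit st.2.1 st.2.2, 1, PySem.List.slice cs (some j) (some (j + w)))

-- A's body for one width w: length of the compressed string
def aInner (cs : List Char) (w : Int) : Int :=
  let st := (PySem.List.pyRange w (PySem.List.len cs) w).foldl (aStep cs w)
      ([], 1, PySem.List.slice cs (some 0) (some w))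
  PySem.List.len (st.1 ++ aEmit st.2.1 st.2.2)

def solution (s : String) : Int :=
  let cs := s.toList
  let length := PySem.List.len cs
  (PySem.List.pyRange 1 (PySem.Int.floordiv length 2 + 1) 1).foldl
    (fun answer w => min answer (aInner cs w)) length

-- ===== PORT B =====
-- j == 0 or s[j-w:j] != s[j:j+w]
def newrun (cs : List Char) (w : Int) (j : Int) : Bool :=
  j == 0 || (PySem.List.slice cs (some (j - w)) (some j) != PySem.List.slice cs (some j) (some (j + w)))

-- w + len(str(-(-(b - a) // w))) if b - a > w else b - a
def runCost (w a b : Int) : Int :=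
  if b - a > w then w + PySem.List.len (PySem.Int.toChars (-(PySem.Int.floordiv (-(b - a)) w)))
  else b - a

-- B's body for one width w: boundaries, then the sum over consecutive boundary pairs
def bInner (cs : List Char) (w : Int) : Int :=
  let n := PySem.List.len cs
  let starts := (PySem.List.pyRange 0 n w).filter (newrun cs w)
  ((starts.zip (starts.drop 1 ++ [n])).map (fun p => runCost w p.1 p.2)).sum

def solution_alt (s : String) : Int :=
  let cs := s.toList
  let n := PySem.List.len cs
  (PySem.List.pyRange 1 (PySem.Int.floordiv n 2 + 1) 1).foldl
    (fun best w => min best (bInner cs w)) n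

-- ===== PRECONDITION & SPEC =====
def Spec_solution (s : String) (out : Int) : Prop := out = solution_alt s
instance (s : String) (out : Int) : Decidable (Spec_solution s out) := by unfold Spec_solution; infer_instance

-- ===== CLAIM (what is proved, stated in full; the proofs are below) =====
def Claim_equal_solution : Prop := ∀ (s : String), Dom_solution s → Spec_solution s (solution s)

-- ===== LEMMAS AND PROOFS =====

-- the width-w window of cs starting at j
def chunkAt (cs : List Char) (w j : Int) : List Char :=
  PySem.List.slice cs (some j) (some (j + w))

-- run-length-encoding step (reference structure for A's inner loop)
def rleStep (runs : List (List Char × Int)) (c : List Char) : List (List Char × Int) :=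
  match runs.getLast? with
  | some r => if r.1 = c then runs.dropLast ++ [(r.1, r.2 + 1)] else runs ++ [(c, 1)]
  | none => [(c, 1)]

-- cost of one run: len(chunk) + (len(str(count)) if count >= 2 else 0)
def bCost (r : List Char × Int) : Int :=
  PySem.List.len r.1 + (if r.2 ≥ 2 then PySem.List.len (PySem.Int.toChars r.2) else 0)

-- cost of B's boundary list
def zcost (w n : Int) (st : List Int) : Int :=
  ((st.zip (st.drop 1 ++ [n])).map (fun p => runCost w p.1 p.2)).sum

-- A positive-step range splits off its head.
theorem pyRange_cons_pos (a b w : Int) (hw : 0 < w) (hab : a < b) :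
    PySem.List.pyRange a b w = a :: PySem.List.pyRange (a + w) b w := by
  rw [PySem.List.pyRange_of_pos _ _ hw, PySem.List.pyRange_of_pos _ _ hw]
  have key : (b - a + w - 1) / w = (b - (a + w) + w - 1) / w + 1 := by
    have h1 : b - a + w - 1 = (b - (a + w) + w - 1) + 1 * w := by ring
    rw [h1, Int.add_mul_ediv_right _ _ (by omega : w ≠ 0)]
  by_cases h : a + w < b
  · have hnn : 0 ≤ (b - (a + w) + w - 1) / w := Int.ediv_nonneg (by omega) (by omega)
    have hNat : ((b - a + w - 1) / w).toNat = ((b - (a + w) + w - 1) / w).toNat + 1 := by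
      omega
    simp only [if_pos hab, if_pos h, hNat, List.range_succ_eq_map, List.map_cons, List.map_map]
    congr 1
    · simp
    · apply List.map_congr_left
      intro k _
      simp only [Function.comp_apply, Nat.succ_eq_add_one]
      push_cast
      ring
  · have hz : (b - (a + w) + w - 1) / w = 0 := Int.ediv_eq_zero_of_lt (by omega) (by omega)
    have hNat : ((b - a + w - 1) / w).toNat = 1 := by omega
    simp [if_pos hab, if_neg h, hNat]

-- A positive-step range with an empty span is empty.
theorem pyRange_nil_pos (a b w : Int) (hw : 0 < w) (hab : b ≤ a) :
    PySem.List.pyRange a b w = [] := by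
  rw [PySem.List.pyRange_of_pos _ _ hw, if_neg (by omega)]
  simp

-- gStep: A's step seen as a function of the chunk value
def gStep (st : List Char × Int × List Char) (c : List Char) : List Char × Int × List Char :=
  if st.2.2 = c then (st.1, st.2.1 + 1, st.2.2) else (st.1 ++ aEmit st.2.1 st.2.2, 1, c)

theorem rleStep_append (R T : List (List Char × Int)) (hT : T ≠ []) (c : List Char) :
    rleStep (R ++ T) c = R ++ rleStep T c := by
  obtain ⟨r, hr⟩ : ∃ r, T.getLast? = some r := by
    cases hT' : T.getLast? with
    | none => exact absurd (List.getLast?_eq_none_iff.mp hT') hT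
    | some r => exact ⟨r, rfl⟩
  unfold rleStep
  rw [List.getLast?_append, hr]
  simp only [Option.some_or]
  split_ifs
  · rw [List.dropLast_append, if_neg (by simpa using hT), List.append_assoc]
  · rw [List.append_assoc]

theorem rleStep_ne_nil (runs : List (List Char × Int)) (c : List Char) :
    rleStep runs c ≠ [] := by
  unfold rleStep
  split
  · split_ifs <;> simp
  · simp

theorem runsFold_append (tail : List (List Char)) (R T : List (List Char × Int)) (hT : T ≠ []) :
    tail.foldl rleStep (R ++ T) = R ++ tail.foldl rleStep T := by
  induction tail generalizing T with
  | nil => rfl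
  | cons c tail ih =>
    simp only [List.foldl_cons]
    rw [rleStep_append R T hT c, ih (rleStep T c) (rleStep_ne_nil T c)]

theorem len_aEmit (count : Int) (cur : List Char) :
    ((aEmit count cur).length : Int) = bCost (cur, count) := by
  unfold aEmit bCost
  split_ifs
  · simp; ring
  · simp

-- A's fold computes the compressed length of the run-length encoding.
theorem main_lemma (tail : List (List Char)) (comp : List Char) (count : Int) (cur : List Char) :
    (((tail.foldl gStep (comp, count, cur)).1 ++
        aEmit (tail.foldl gStep (comp, count, cur)).2.1 (tail.foldl gStep (comp, count, cur)).2.2).length : Int)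
      = (comp.length : Int) + ((tail.foldl rleStep [(cur, count)]).map bCost).sum := by
  induction tail generalizing comp count cur with
  | nil =>
    simp only [List.foldl_nil, List.map_cons, List.map_nil, List.sum_cons, List.sum_nil,
      List.length_append]
    have := len_aEmit count cur
    push_cast
    omega
  | cons c tail ih =>
    simp only [List.foldl_cons]
    by_cases hc : cur = c
    · have hg : gStep (comp, count, cur) c = (comp, count + 1, cur) := by
        simp [gStep, hc]
      have hb : rleStep [(cur, count)] c = [(cur, count + 1)] := by
        simp [rleStep, hc]
      rw [hg, hb, ih]
    · have hg : gStep (comp, count, cur) c = (comp ++ aEmit count cur, 1, c) := by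
        simp [gStep, hc]
      have hb : rleStep [(cur, count)] c = [(cur, count)] ++ [(c, 1)] := by
        simp [rleStep, hc]
      rw [hg, hb, runsFold_append tail [(cur, count)] [(c, 1)] (by simp), ih]
      simp only [List.map_append, List.map_cons, List.map_nil, List.sum_append, List.sum_cons,
        List.sum_nil, List.length_append]
      have := len_aEmit count cur
      push_cast
      omega

-- aInner equals the RLE cost of the full chunk list.
theorem aInner_eq_rle (cs : List Char) (w : Int) (hw : 0 < w) (hn : 0 < (cs.length : Int)) :
    aInner cs w =
      ((((PySem.List.pyRange 0 (cs.length : Int) w).map (chunkAt cs w)).foldl rleStep []).map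
        bCost).sum := by
  unfold aInner
  simp only [PySem.List.len_eq]
  rw [pyRange_cons_pos 0 _ w hw (by omega)]
  simp only [List.map_cons, List.foldl_cons, zero_add]
  have hr0 : rleStep [] (chunkAt cs w 0) = [(chunkAt cs w 0, 1)] := by
    simp [rleStep]
  rw [hr0]
  have hfold : ∀ (init : List Char × Int × List Char),
      (PySem.List.pyRange w (cs.length : Int) w).foldl (aStep cs w) init
        = ((PySem.List.pyRange w (cs.length : Int) w).map (chunkAt cs w)).foldl gStep init := by
    intro init
    rw [List.foldl_map]
    rfl
  rw [hfold]
  have := main_lemma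
    ((PySem.List.pyRange w (cs.length : Int) w).map (chunkAt cs w))
    [] 1 (chunkAt cs w 0)
  simpa [chunkAt, zero_add] using this

-- The fold over one run: count the equal-to-head prefix, then start fresh.
theorem span_cost (l : List (List Char)) (c : List Char) : ∀ (cnt : Int),
    ((l.foldl rleStep [(c, cnt)]).map bCost).sum
      = bCost (c, cnt + ((l.takeWhile (· == c)).length : Int))
        + (((l.dropWhile (· == c)).foldl rleStep []).map bCost).sum := by
  induction l with
  | nil => intro cnt; simp
  | cons x t ih =>
    intro cnt
    by_cases hx : x = c
    · subst hx
      have hstep : rleStep [(x, cnt)] x = [(x, cnt + 1)] := by simp [rleStep]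
      simp only [List.foldl_cons, hstep, List.takeWhile_cons, List.dropWhile_cons,
        beq_self_eq_true, if_true, List.length_cons]
      rw [ih (cnt + 1)]
      congr 2
      push_cast
      ring_nf
    · have hstep : rleStep [(c, cnt)] x = [(c, cnt)] ++ [(x, 1)] := by
        simp [rleStep, (Ne.symm hx : c ≠ x)]
      have hbx : (x == c) = false := by simp [hx]
      simp only [List.foldl_cons, hstep, List.takeWhile_cons, List.dropWhile_cons, hbx,
        Bool.false_eq_true, if_neg, not_false_eq_true, List.length_nil]
      rw [runsFold_append t [(c, cnt)] [(x, 1)] (by simp)]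
      have hr0 : rleStep [] x = [(x, 1)] := by simp [rleStep]
      simp [hr0]

-- takeWhile / dropWhile of a positive-step range are ranges.
theorem tw_dw_pyRange (q : Int → Bool) (n w : Int) (hw : 0 < w) :
    ∀ (fuel : ℕ) (a : Int), (n - a).toNat ≤ fuel →
      (PySem.List.pyRange a n w).takeWhile q
          = PySem.List.pyRange a (a + ((PySem.List.pyRange a n w).takeWhile q).length * w) w
        ∧ (PySem.List.pyRange a n w).dropWhile q
          = PySem.List.pyRange (a + ((PySem.List.pyRange a n w).takeWhile q).length * w) n w := by
  intro fuel
  induction fuel with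
  | zero =>
    intro a hf
    have ha : n ≤ a := by omega
    rw [pyRange_nil_pos a n w hw ha]
    constructor
    · simp [pyRange_nil_pos a a w hw (le_refl a)]
    · simp [pyRange_nil_pos a n w hw ha]
  | succ fuel ih =>
    intro a hf
    by_cases ha : a < n
    · rw [pyRange_cons_pos a n w hw ha]
      by_cases hq : q a
      · obtain ⟨ihT, ihD⟩ := ih (a + w) (by omega)
        simp only [List.takeWhile_cons, List.dropWhile_cons, hq, if_pos, List.length_cons]
        have hL0 : (0:Int) ≤ (((PySem.List.pyRange (a + w) n w).takeWhile q).length : Int) := by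
          positivity
        refine ⟨?_, ?_⟩
        · push_cast
          generalize hLen : (((PySem.List.pyRange (a + w) n w).takeWhile q).length : Int) = L
            at ihT hL0 ⊢
          have hlt : a < a + (L + 1) * w := by nlinarith
          rw [ihT, pyRange_cons_pos a _ w hw hlt]
          congr 2
          ring
        · push_cast
          generalize hLen : (((PySem.List.pyRange (a + w) n w).takeWhile q).length : Int) = L
            at ihD hL0 ⊢
          rw [ihD]
          congr 1
          ring
      · simp only [List.takeWhile_cons, List.dropWhile_cons, hq, Bool.false_eq_true, if_neg,
          not_false_eq_true, List.length_nil]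
        refine ⟨?_, ?_⟩
        · push_cast
          rw [pyRange_nil_pos a (a + 0 * w) w hw (by omega)]
        · push_cast
          rw [← pyRange_cons_pos a n w hw ha]
          congr 1
          omega
    · rw [pyRange_nil_pos a n w hw (by omega)]
      constructor
      · simp [pyRange_nil_pos a a w hw (le_refl a)]
      · simp [pyRange_nil_pos a n w hw (by omega)]

-- head of a dropWhile fails the predicate
theorem dropWhile_head_false {α : Type} (q : α → Bool) :
    ∀ (l : List α) (x : α) (t : List α), l.dropWhile q = x :: t → q x = false := by
  intro l
  induction l with
  | nil => intro x t h; simp at h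
  | cons y l ih =>
    intro x t h
    rw [List.dropWhile_cons] at h
    by_cases hy : q y
    · rw [if_pos hy] at h
      exact ih x t h
    · rw [if_neg hy] at h
      cases h
      simpa using hy

-- the zip-with-next cost unrolls one run at a time
theorem zcost_cons (w n a : Int) (st : List Int) :
    zcost w n (a :: st) = runCost w a (st.headD n) + zcost w n st := by
  cases st with
  | nil => simp [zcost]
  | cons x t => simp [zcost, List.zip]

-- length of a window
theorem len_chunkAt (cs : List Char) (w j : Int) (hw : 0 < w) (h0 : 0 ≤ j)
    (hj : j ≤ (cs.length : Int)) :
    ((chunkAt cs w j).length : Int) = min w ((cs.length : Int) - j) := by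
  unfold chunkAt
  rw [PySem.List.slice_toNat cs h0 (by omega)]
  simp only [List.length_take, List.length_drop]
  omega

-- run cost match, middle run (the run ends at boundary j + k*w ≤ n)
theorem cost_eq_mid (cs : List Char) (w j k : Int) (hw : 0 < w) (h0 : 0 ≤ j) (hk : 1 ≤ k)
    (hjw : j + w ≤ (cs.length : Int)) :
    bCost (chunkAt cs w j, k) = runCost w j (j + k * w) := by
  have hlen : ((chunkAt cs w j).length : Int) = w := by
    rw [len_chunkAt cs w j hw h0 (by omega)]; omega
  unfold bCost runCost
  simp only [PySem.List.len_eq, hlen]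
  by_cases h2 : 2 ≤ k
  · have hgt : j + k * w - j > w := by nlinarith
    have hceil : -(PySem.Int.floordiv (-(j + k * w - j)) w) = k := by
      rw [PySem.Int.neg_floordiv_neg_eq_iff_of_pos hw]
      constructor <;> nlinarith
    rw [if_pos (by omega), if_pos hgt, hceil]
  · have hk1 : k = 1 := by omega
    subst hk1
    rw [if_neg (by omega), if_neg (by omega)]
    ring

-- run cost match, final run (ends at n)
theorem cost_eq_last (cs : List Char) (w j k : Int) (hw : 0 < w) (h0 : 0 ≤ j) (hk : 1 ≤ k)
    (hlow : (k - 1) * w < (cs.length : Int) - j) (hhigh : (cs.length : Int) - j ≤ k * w) :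
    bCost (chunkAt cs w j, k) = runCost w j (cs.length : Int) := by
  unfold bCost runCost
  simp only [PySem.List.len_eq]
  by_cases h2 : 2 ≤ k
  · have hlen : ((chunkAt cs w j).length : Int) = w := by
      rw [len_chunkAt cs w j hw h0 (by nlinarith)]
      have : j + w ≤ (cs.length : Int) := by nlinarith
      omega
    have hgt : (cs.length : Int) - j > w := by nlinarith
    have hceil : -(PySem.Int.floordiv (-((cs.length : Int) - j)) w) = k := by
      rw [PySem.Int.neg_floordiv_neg_eq_iff_of_pos hw]
      exact ⟨hlow, hhigh⟩
    rw [if_pos (by omega), if_pos hgt, hceil, hlen]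
  · have hk1 : k = 1 := by omega
    subst hk1
    have hlen : ((chunkAt cs w j).length : Int) = (cs.length : Int) - j := by
      rw [len_chunkAt cs w j hw h0 (by omega)]; omega
    rw [if_neg (by omega), if_neg (by omega), hlen]
    ring

-- chunks in the interior of a run are not run starts
theorem newrun_eq_of_eq (cs : List Char) (w i : Int) (hi0 : i ≠ 0)
    (heq : chunkAt cs w (i - w) = chunkAt cs w i) : newrun cs w i = false := by
  unfold chunkAt at heq
  have hx : i - w + w = i := by ring
  rw [hx] at heq
  unfold newrun
  rw [heq]
  simp [hi0]

-- THE MAIN INDUCTION: A's RLE cost over the chunks from j equals B's boundary-pair cost from j.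
theorem main_bridge (cs : List Char) (w : Int) (hw : 0 < w) :
    ∀ (fuel : ℕ) (j : Int), 0 ≤ j → j < (cs.length : Int) →
      ((cs.length : Int) - j).toNat ≤ fuel → newrun cs w j = true →
      ((((PySem.List.pyRange j (cs.length : Int) w).map (chunkAt cs w)).foldl rleStep []).map
          bCost).sum
        = zcost w (cs.length : Int)
            ((PySem.List.pyRange j (cs.length : Int) w).filter (newrun cs w)) := by
  intro fuel
  induction fuel with
  | zero => intro j h0 hj hf _; omega
  | succ fuel ih =>
    intro j h0 hj hf hnew
    set cj : List Char := chunkAt cs w j with hcj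
    set q : Int → Bool := fun i => chunkAt cs w i == cj with hq
    set l : List Int := PySem.List.pyRange (j + w) (cs.length : Int) w with hl
    set p : List Int := l.takeWhile q with hp
    set r : List Int := l.dropWhile q with hr
    have hcons : PySem.List.pyRange j (cs.length : Int) w = j :: l :=
      pyRange_cons_pos j (cs.length : Int) w hw hj
    obtain ⟨hTW, hDW⟩ := tw_dw_pyRange q (cs.length : Int) w hw fuel (j + w) (by omega)
    set m : Int := j + w + (p.length : Int) * w with hm
    have hpr : p = PySem.List.pyRange (j + w) m w := by
      rw [hp, hTW]
    have hrr : r = PySem.List.pyRange m (cs.length : Int) w := by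
      rw [hr, hDW]
    -- every element of p has its chunk equal to cj
    have hqp : ∀ i ∈ p, chunkAt cs w i = cj := by
      intro i hi
      rw [hp] at hi
      have := List.mem_takeWhile_imp hi
      rw [hq] at this
      exact beq_iff_eq.mp this
    -- members of p are spaced by w inside [j+w, m)
    have hmemp : ∀ i ∈ p, j + w ≤ i ∧ i < m ∧ w ∣ i - (j + w) := by
      intro i hi
      rw [hpr] at hi
      exact (PySem.List.mem_pyRange_iff_of_pos hw i).mp hi
    have hmemp' : ∀ i : Int, j + w ≤ i → i < m → w ∣ i - (j + w) → i ∈ p := by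
      intro i h1 h2 h3
      rw [hpr]
      exact (PySem.List.mem_pyRange_iff_of_pos hw i).mpr ⟨h1, h2, h3⟩
    -- elements of p are below n
    have hpn : ∀ i ∈ p, i < (cs.length : Int) := by
      intro i hi
      rw [hp] at hi
      have : i ∈ l := (List.takeWhile_sublist q).subset hi
      rw [hl] at this
      exact ((PySem.List.mem_pyRange_iff_of_pos hw i).mp this).2.1
    have hplen0 : (0:Int) ≤ (p.length : Int) := by positivity
    -- the previous chunk of m equals cj (needed for the new-run flag at m)
    have hprev : chunkAt cs w (m - w) = cj := by
      by_cases hp0 : p = []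
      · have e : m - w = j := by rw [hm, hp0]; simp
        rw [e, hcj]
      · have hlp : 1 ≤ (p.length : Int) := by
          have := List.length_pos_iff.mpr hp0
          omega
        apply hqp
        refine hmemp' (m - w) ?_ ?_ ⟨(p.length : Int) - 1, ?_⟩
        · rw [hm]; nlinarith
        · rw [hm]; nlinarith
        · rw [hm]; ring
    -- last chunk of the run starts below n
    have hlastlt : j + (p.length : Int) * w < (cs.length : Int) := by
      by_cases hp0 : p = []
      · rw [hp0]; simpa using hj
      · have hlp : 1 ≤ (p.length : Int) := by
          have := List.length_pos_iff.mpr hp0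
          omega
        have hmem : m - w ∈ p := by
          refine hmemp' (m - w) ?_ ?_ ⟨(p.length : Int) - 1, ?_⟩
          · rw [hm]; nlinarith
          · rw [hm]; nlinarith
          · rw [hm]; ring
        have := hpn _ hmem
        rw [hm] at this
        omega
    -- interior chunks are not run starts
    have hnot : ∀ i ∈ p, newrun cs w i = false := by
      intro i hi
      obtain ⟨h1, h2, t, ht⟩ := hmemp i hi
      apply newrun_eq_of_eq cs w i (by omega)
      rw [hqp i hi]
      by_cases hij : i = j + w
      · have e : j + w - w = j := by ring
        rw [hij, e, hcj]
      · have htpos : 0 < t := by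
          rcases lt_trichotomy t 0 with hc | hc | hc
          · nlinarith [lt_of_le_of_ne h1 (Ne.symm hij)]
          · subst hc; simp at ht; omega
          · exact hc
        have hwle : j + w + w ≤ i := by nlinarith
        have hiw : i - w ∈ p := by
          refine hmemp' (i - w) (by omega) (by omega) ⟨t - 1, by linear_combination ht⟩
        rw [hqp _ hiw]
    -- the filtered boundary list from j
    have hsplit : l = p ++ r := (List.takeWhile_append_dropWhile).symm
    have hfilterp : p.filter (newrun cs w) = [] := by
      rw [List.filter_eq_nil_iff]
      intro i hi
      simp [hnot i hi]
    have hfilter : (PySem.List.pyRange j (cs.length : Int) w).filter (newrun cs w)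
        = j :: r.filter (newrun cs w) := by
      rw [hcons, hsplit, List.filter_cons, if_pos hnew, List.filter_append, hfilterp,
        List.nil_append]
    -- RLE side: split off the first run
    have hLHS : ((((PySem.List.pyRange j (cs.length : Int) w).map (chunkAt cs w)).foldl rleStep
          []).map bCost).sum
        = bCost (cj, 1 + (p.length : Int))
          + (((r.map (chunkAt cs w)).foldl rleStep []).map bCost).sum := by
      rw [hcons]
      simp only [List.map_cons, List.foldl_cons]
      have hr0 : rleStep [] cj = [(cj, 1)] := by simp [rleStep]
      rw [hr0, span_cost (l.map (chunkAt cs w)) cj 1, List.takeWhile_map, List.dropWhile_map]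
      have hcomp : ((fun x => x == cj) ∘ chunkAt cs w) = q := by
        funext i
        rfl
      rw [hcomp, List.length_map, ← hp, ← hr]
    rw [hLHS, hfilter]
    by_cases hmn : m < (cs.length : Int)
    · -- there is a next run, starting at m
      have hrc : r = m :: PySem.List.pyRange (m + w) (cs.length : Int) w := by
        rw [hrr]; exact pyRange_cons_pos m (cs.length : Int) w hw hmn
      have hqm : q m = false := by
        apply dropWhile_head_false q l m _
        rw [← hrc]
      have hqm' : chunkAt cs w m ≠ cj := by
        intro hc
        rw [hq] at hqm
        simp only [beq_eq_false_iff_ne, ne_eq] at hqm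
        exact hqm hc
      have hnewm : newrun cs w m = true := by
        unfold newrun
        rw [Bool.or_eq_true]
        right
        rw [bne_iff_ne]
        intro hcontra
        apply hqm'
        have e : m - w + w = m := by ring
        calc chunkAt cs w m = PySem.List.slice cs (some m) (some (m + w)) := rfl
          _ = PySem.List.slice cs (some (m - w)) (some m) := hcontra.symm
          _ = chunkAt cs w (m - w) := by unfold chunkAt; rw [e]
          _ = cj := hprev
      have hfr : r.filter (newrun cs w)
          = m :: (PySem.List.pyRange (m + w) (cs.length : Int) w).filter (newrun cs w) := by
        rw [hrc, List.filter_cons, if_pos hnewm]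
      have hfuel2 : ((cs.length : Int) - m).toNat ≤ fuel := by
        have hd : (0:Int) ≤ (p.length : Int) * w := by positivity
        rw [hm] at hmn ⊢
        omega
      have hIH := ih m (by rw [hm]; nlinarith) hmn hfuel2 hnewm
      rw [zcost_cons]
      have hhead2 : (r.filter (newrun cs w)).headD (cs.length : Int) = m := by
        rw [hfr]; rfl
      rw [hhead2]
      have hcost : bCost (cj, 1 + (p.length : Int)) = runCost w j m := by
        have hjw : j + w ≤ (cs.length : Int) := by
          rw [hm] at hmn; nlinarith
        have := cost_eq_mid cs w j (1 + (p.length : Int)) hw h0 (by omega) hjw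
        rw [hcj, this]
        congr 1
        rw [hm]; ring
      rw [hcost]
      congr 1
      rw [hrr, hIH]
    · -- the run reaches the end of the string
      have hrnil : r = [] := by
        rw [hrr]
        exact pyRange_nil_pos m (cs.length : Int) w hw (by omega)
      rw [hrnil]
      simp only [List.filter_nil, List.map_nil, List.foldl_nil, List.sum_nil, add_zero]
      rw [zcost_cons]
      simp only [List.headD_nil, zcost, List.zip_nil_left, List.map_nil, List.sum_nil, add_zero]
      have hmge : (cs.length : Int) ≤ m := by omega
      rw [hm] at hmge
      have := cost_eq_last cs w j (1 + (p.length : Int)) hw h0 (by omega)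
        (by nlinarith [hlastlt]) (by nlinarith [hmge])
      rw [hcj, this]

-- per-width equality
theorem inner_eq (cs : List Char) (w : Int) (hw : 0 < w) (hn : 0 < (cs.length : Int)) :
    aInner cs w = bInner cs w := by
  rw [aInner_eq_rle cs w hw hn]
  have h0 : newrun cs w 0 = true := by simp [newrun]
  have := main_bridge cs w hw ((cs.length : Int) - 0).toNat 0 (le_refl 0) hn (le_refl _) h0
  rw [this]
  unfold bInner zcost
  simp [PySem.List.len_eq]

-- ===== VERDICT (by name: the statement is the Claim_ definition above) =====
theorem solution_spec : Claim_equal_solution := by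
  intro s _
  unfold Spec_solution solution solution_alt
  simp only [PySem.List.len_eq]
  apply PySem.List.foldl_congr_mem
  intro acc w hw
  rw [PySem.List.mem_pyRange_one] at hw
  have h2 : w ≤ PySem.Int.floordiv (s.toList.length : Int) 2 := by omega
  rw [PySem.Int.floordiv_eq_ediv_of_pos (by omega)] at h2
  have hn : 0 < (s.toList.length : Int) := by omega
  rw [inner_eq s.toList w (by omega) hn]
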